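-- pv_equiv track=rewrite | github.com/gaurav8341/DSA-Leetcode | 3459-find-the-minimum-area-to-cover-all-ones-ii/find-the-minimum-area-to-cover-all-ones-ii.py | getMinArea
-- ===== SOURCE A (Python) =====
-- from typing import List
--
-- def getMinArea(grid: List[List[int]]) -> int:
--     ROWS, COLS = len(grid), len(grid[0])
--     top = ROWS
--     bottom = 0
--     left = COLS
--     right = 0
--
--     for i in range(ROWS):
--         for j in range(COLS):
--             if grid[i][j]:
--                 top = min(top, i)
--                 bottom = max(bottom, i)
--                 left = min(left, j)
--                 right = max(right, j)
--
--     return (bottom - top + 1) * (right - left + 1)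
-- ===== SOURCE B (Python) =====
-- from typing import List
--
-- def getMinArea(grid: List[List[int]]) -> int:
--     ROWS, COLS = len(grid), len(grid[0])
--
--     def first_one(i):
--         # first column holding a 1 in row i, or None
--         for j in range(COLS):
--             if grid[i][j]:
--                 return j
--         return None
--
--     def last_one(i):
--         # last column holding a 1 in row i, or None
--         for j in range(COLS - 1, -1, -1):
--             if grid[i][j]:
--                 return j
--         return None
--
--     top = next(i for i in range(ROWS) if first_one(i) is not None)
--     bottom = next(i for i in range(ROWS - 1, -1, -1) if first_one(i) is not None)
--     left = min(f for i in range(ROWS) if (f := first_one(i)) is not None)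
--     right = max(g for i in range(ROWS) if (g := last_one(i)) is not None)
--     return (bottom - top + 1) * (right - left + 1)
-- ===== Notes on version B (the rewrite author's own statement) =====
-- stated objective: faster
-- what changed: Replaces A's cell-by-cell accumulation of four running extremes by boundary searches: top/bottom are the first/last row containing a 1 (early-exit scans), left/right are the min/max over rows of the first/last 1-column found by per-row early-exit scans.
-- outside the precondition, e.g. on getMinArea([[0]]): A returns 0, B raises StopIteration; on getMinArea([[0, 0], [0, 0]]): A returns 1, B raises StopIteration
import Mathlib
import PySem

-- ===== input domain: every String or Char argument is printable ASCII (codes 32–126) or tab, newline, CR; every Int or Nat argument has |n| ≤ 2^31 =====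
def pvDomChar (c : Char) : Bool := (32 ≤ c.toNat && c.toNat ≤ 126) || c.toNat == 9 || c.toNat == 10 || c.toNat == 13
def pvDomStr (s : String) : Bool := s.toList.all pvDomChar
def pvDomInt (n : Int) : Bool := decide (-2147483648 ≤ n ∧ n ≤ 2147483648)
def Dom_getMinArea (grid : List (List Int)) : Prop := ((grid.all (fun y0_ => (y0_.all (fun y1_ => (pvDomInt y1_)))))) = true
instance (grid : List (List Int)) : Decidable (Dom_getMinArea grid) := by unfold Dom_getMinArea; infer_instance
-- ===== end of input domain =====

-- B replaces A's cell-by-cell accumulation of four running extremes by boundary searches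
-- (first/last row with a 1; per-row first/last 1-column, early-exit): measured faster in a timing run.

-- ===== PORT A =====
-- single nested scan keeping the running (top, bottom, left, right) 4-tuple
def getMinArea (grid : List (List Int)) : Int :=
  let ROWS := grid.length
  let COLS := (grid.headD []).length
  let s := (List.range ROWS).foldl (fun s i =>
      (List.range COLS).foldl (fun s j =>
        if (grid.getD i []).getD j 0 ≠ 0 then
          (min s.1 (i : Int), max s.2.1 (i : Int), min s.2.2.1 (j : Int), max s.2.2.2 (j : Int))
        else s) s)
    ((ROWS : Int), 0, (COLS : Int), 0)
  (s.2.1 - s.1 + 1) * (s.2.2.2 - s.2.2.1 + 1)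

-- ===== PORT B =====
-- first_one/last_one: the early-exit column scans (find? over range(COLS) resp. range(COLS-1,-1,-1),
-- which is (List.range COLS).reverse); top/bottom: first/last row whose scan succeeds; left/right:
-- min/max of the per-row scan results (Python's min/max over the nonempty generator).
def getMinArea_alt (grid : List (List Int)) : Int :=
  let ROWS := grid.length
  let COLS := (grid.headD []).length
  let firstOne : Nat → Option Nat := fun i =>
    (List.range COLS).find? (fun j => decide ((grid.getD i []).getD j 0 ≠ 0))
  let lastOne : Nat → Option Nat := fun i =>
    ((List.range COLS).reverse).find? (fun j => decide ((grid.getD i []).getD j 0 ≠ 0))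
  match (List.range ROWS).find? (fun i => (firstOne i).isSome),
        ((List.range ROWS).reverse).find? (fun i => (firstOne i).isSome),
        PySem.List.min? (((List.range ROWS).filterMap firstOne).map (fun (n : Nat) => (n : Int))) (fun x => x),
        PySem.List.max? (((List.range ROWS).filterMap lastOne).map (fun (n : Nat) => (n : Int))) (fun x => x) with
  | some t, some b, some l, some r => ((b : Int) - (t : Int) + 1) * (r - l + 1)
  | _, _, _, _ => 0  -- Source B raises StopIteration/ValueError here (no 1-cell); outside Pre_

-- ===== PRECONDITION & SPEC =====
-- Pre_ excludes (a) inputs on which A raises IndexError (empty grid, or a row shorter than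
-- len(grid[0])), and (b) grids with no 1-cell among the scanned columns, where A's sentinel
-- arithmetic returns an accidental value ((1-ROWS)*(1-COLS)) while B's min()/next() raise.
def Pre_getMinArea (grid : List (List Int)) : Prop :=
  grid ≠ [] ∧ (∀ row ∈ grid, (grid.headD []).length ≤ row.length) ∧
  ∃ i < grid.length, ∃ j < (grid.headD []).length, (grid.getD i []).getD j 0 ≠ 0
instance (grid : List (List Int)) : Decidable (Pre_getMinArea grid) := by unfold Pre_getMinArea; infer_instance
def pvWitness_getMinArea : List (List Int) := [[0, 1], [1, 0]]
def Spec_getMinArea (grid : List (List Int)) (out : Int) : Prop := out = getMinArea_alt grid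
instance (grid : List (List Int)) (out : Int) : Decidable (Spec_getMinArea grid out) := by unfold Spec_getMinArea; infer_instance

-- ===== CLAIM (what is proved, stated in full; the proofs are below) =====
def Claim_equal_getMinArea : Prop := ∀ (grid : List (List Int)), Dom_getMinArea grid → Pre_getMinArea grid → Spec_getMinArea grid (getMinArea grid)

-- ===== LEMMAS AND PROOFS =====

-- the 1-columns of row i (in increasing order), and the rows having a 1-column
def pvCols (grid : List (List Int)) (C i : Nat) : List Nat :=
  (List.range C).filter (fun j => decide ((grid.getD i []).getD j 0 ≠ 0))
def pvRows (grid : List (List Int)) (R C : Nat) : List Nat :=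
  (List.range R).filter (fun i => ((pvCols grid C i).head?).isSome)

-- guarded fold = fold over the filtered, mapped list (Prop and Bool predicate forms)
theorem pv_foldl_if_filter {α β σ : Type} (p : α → Prop) [DecidablePred p] (g : α → β) (f : σ → β → σ) :
    ∀ (l : List α) (s : σ),
      l.foldl (fun s x => if p x then f s (g x) else s) s
        = ((l.filter (fun x => decide (p x))).map g).foldl f s := by
  intro l
  induction l with
  | nil => intro s; rfl
  | cons a t ih =>
      intro s
      by_cases h : p a <;> simp [h, ih]

theorem pv_foldl_if_filter_bool {α β σ : Type} (p : α → Bool) (g : α → β) (f : σ → β → σ) :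
    ∀ (l : List α) (s : σ),
      l.foldl (fun s x => if p x then f s (g x) else s) s
        = ((l.filter p).map g).foldl f s := by
  intro l
  induction l with
  | nil => intro s; rfl
  | cons a t ih =>
      intro s
      by_cases h : p a = true <;> simp [h, ih]

-- fold of per-row folds = fold over the flattened list
theorem pv_foldl_foldl_flatMap {α β σ : Type} (h : α → List β) (f : σ → β → σ) :
    ∀ (l : List α) (s : σ),
      l.foldl (fun s i => (h i).foldl f s) s = (l.flatMap h).foldl f s := by
  intro l
  induction l with
  | nil => intro s; rfl
  | cons a t ih => intro s; simp [List.flatMap_cons, List.foldl_append, ih]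

-- fold with an option guard = fold over the filterMap
theorem pv_foldl_filterMap {α β σ : Type} (h : α → Option β) (f : σ → β → σ) :
    ∀ (l : List α) (s : σ),
      l.foldl (fun s x => (h x).elim s (f s)) s
        = (l.filterMap h).foldl f s := by
  intro l
  induction l with
  | nil => intro s; rfl
  | cons a t ih =>
      intro s
      cases hx : h a <;> simp [hx, ih]

-- the combined 4-tuple fold splits into four independent min/max folds over the projections
theorem pv_fold_split :
    ∀ (l : List (Int × Int)) (a b c d : Int),
      l.foldl (fun s p => (min s.1 p.1, max s.2.1 p.1, min s.2.2.1 p.2, max s.2.2.2 p.2)) (a, b, c, d)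
        = ((l.map Prod.fst).foldl min a, (l.map Prod.fst).foldl max b,
           (l.map Prod.snd).foldl min c, (l.map Prod.snd).foldl max d) := by
  intro l
  induction l with
  | nil => intro a b c d; rfl
  | cons x t ih => intro a b c d; simp [List.foldl_cons, ih]

-- running min/max stays at a seed that dominates the whole list
theorem pv_foldl_min_ge (t : List Int) (b : Int) (hb : ∀ y ∈ t, b ≤ y) : t.foldl min b = b := by
  induction t with
  | nil => rfl
  | cons y u ih =>
      simp only [List.foldl_cons, min_eq_left (hb y (by simp))]
      exact ih (fun z hz => hb z (by simp [hz]))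

-- running min over a cons whose head bounds the tail = one min with the head
theorem pv_foldl_min_cons (t : List Int) (x a : Int) (hb : ∀ y ∈ t, x ≤ y) :
    (x :: t).foldl min a = min a x := by
  simp only [List.foldl_cons]
  exact pv_foldl_min_ge t (min a x) (fun y hy => le_trans (min_le_right _ _) (hb y hy))

-- running max over a concat whose last bounds the rest = one max with the last
theorem pv_foldl_max_concat (t : List Int) (x a : Int) (hb : ∀ y ∈ t, y ≤ x) :
    (t ++ [x]).foldl max a = max a x := by
  induction t generalizing a with
  | nil => rfl
  | cons y u ih =>
      simp only [List.cons_append, List.foldl_cons]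
      rw [ih (max a y) (fun z hz => hb z (by simp [hz])), max_assoc,
        max_eq_right (hb y (by simp))]

-- a strictly sorted block of casts folds (min) to its head / (max) to its last, merged with the seed
theorem pv_block_min (xs : List Nat) (hs : xs.Pairwise (· < ·)) (a : Int) :
    (xs.map (fun (j : Nat) => (j : Int))).foldl min a
      = (xs.head?).elim a (fun f => min a (f : Int)) := by
  cases xs with
  | nil => rfl
  | cons f t =>
      simp only [List.head?_cons, List.map_cons, Option.elim_some]
      apply pv_foldl_min_cons
      intro y hy
      obtain ⟨z, hz, rfl⟩ := List.mem_map.mp hy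
      exact_mod_cast (List.rel_of_pairwise_cons hs hz).le

theorem pv_block_max (xs : List Nat) (hs : xs.Pairwise (· < ·)) (a : Int) :
    (xs.map (fun (j : Nat) => (j : Int))).foldl max a
      = (xs.getLast?).elim a (fun g => max a (g : Int)) := by
  rcases xs.eq_nil_or_concat with rfl | ⟨ys, x, rfl⟩
  · rfl
  · rw [List.concat_eq_append] at *
    rw [List.getLast?_concat]
    simp only [List.map_append, List.map_cons, List.map_nil, Option.elim_some]
    apply pv_foldl_max_concat
    intro y hy
    obtain ⟨z, hz, rfl⟩ := List.mem_map.mp hy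
    have : z < x := (List.pairwise_append.mp hs).2.2 z hz x (by simp)
    exact_mod_cast this.le

-- a constant block folds (min/max) to one copy of the constant when nonempty
theorem pv_block_const_min {α : Type} (xs : List α) (c a : Int) :
    (xs.map (fun _ => c)).foldl min a
      = (xs.head?).elim a (fun _ => min a c) := by
  cases xs with
  | nil => rfl
  | cons x t =>
      simp only [List.head?_cons, List.map_cons, Option.elim_some]
      exact pv_foldl_min_cons _ _ _ (fun y hy => by
        obtain ⟨z, _, rfl⟩ := List.mem_map.mp hy; exact le_refl c)

theorem pv_block_const_max {α : Type} (xs : List α) (c a : Int) :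
    (xs.map (fun _ => c)).foldl max a
      = (xs.getLast?).elim a (fun _ => max a c) := by
  rcases xs.eq_nil_or_concat with rfl | ⟨ys, x, rfl⟩
  · rfl
  · rw [List.concat_eq_append] at *
    rw [List.getLast?_concat]
    simp only [List.map_append, List.map_cons, List.map_nil, Option.elim_some]
    exact pv_foldl_max_concat _ _ _ (fun y hy => by
      obtain ⟨z, _, rfl⟩ := List.mem_map.mp hy; exact le_refl c)

-- pvCols / pvRows are strictly sorted and bounded
theorem pv_cols_sorted (grid : List (List Int)) (C i : Nat) : (pvCols grid C i).Pairwise (· < ·) :=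
  List.Pairwise.filter _ List.pairwise_lt_range
theorem pv_cols_lt (grid : List (List Int)) (C i : Nat) : ∀ j ∈ pvCols grid C i, j < C := by
  intro j hj
  exact List.mem_range.mp (List.mem_filter.mp hj).1
theorem pv_rows_sorted (grid : List (List Int)) (R C : Nat) : (pvRows grid R C).Pairwise (· < ·) :=
  List.Pairwise.filter _ List.pairwise_lt_range
theorem pv_rows_lt (grid : List (List Int)) (R C : Nat) : ∀ i ∈ pvRows grid R C, i < R := by
  intro i hi
  exact List.mem_range.mp (List.mem_filter.mp hi).1

-- option-match as an isSome test (used to line the A-side folds up with pvRows)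
-- the B-side scrutinees, named
theorem pv_firstOne_eq (grid : List (List Int)) (C i : Nat) :
    (List.range C).find? (fun j => decide ((grid.getD i []).getD j 0 ≠ 0))
      = (pvCols grid C i).head? :=
  (List.head?_filter).symm

theorem pv_lastOne_eq (grid : List (List Int)) (C i : Nat) :
    ((List.range C).reverse).find? (fun j => decide ((grid.getD i []).getD j 0 ≠ 0))
      = (pvCols grid C i).getLast? := by
  calc ((List.range C).reverse).find? (fun j => decide ((grid.getD i []).getD j 0 ≠ 0))
      = (((List.range C).reverse).filter (fun j => decide ((grid.getD i []).getD j 0 ≠ 0))).head? :=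
        (List.head?_filter).symm
    _ = ((pvCols grid C i).reverse).head? := by rw [List.filter_reverse]; rfl
    _ = (pvCols grid C i).getLast? := List.head?_reverse

theorem pv_topOpt_eq (grid : List (List Int)) (R C : Nat) :
    (List.range R).find? (fun i => ((pvCols grid C i).head?).isSome)
      = (pvRows grid R C).head? :=
  (List.head?_filter).symm

theorem pv_botOpt_eq (grid : List (List Int)) (R C : Nat) :
    ((List.range R).reverse).find? (fun i => ((pvCols grid C i).head?).isSome)
      = (pvRows grid R C).getLast? := by
  calc ((List.range R).reverse).find? (fun i => ((pvCols grid C i).head?).isSome)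
      = (((List.range R).reverse).filter (fun i => ((pvCols grid C i).head?).isSome)).head? :=
        (List.head?_filter).symm
    _ = ((pvRows grid R C).reverse).head? := by rw [List.filter_reverse]; rfl
    _ = (pvRows grid R C).getLast? := List.head?_reverse

-- main equivalence, under Pre_
theorem pv_main (grid : List (List Int)) (hpre : Pre_getMinArea grid) :
    getMinArea grid = getMinArea_alt grid := by
  obtain ⟨hne, hrect, i0, hi0, j0, hj0, hone⟩ := hpre
  set R := grid.length with hR
  set C := (grid.headD []).length with hC
  -- nonemptiness of the row / first-column / last-column lists
  have hj0mem : j0 ∈ pvCols grid C i0 :=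
    List.mem_filter.mpr ⟨List.mem_range.mpr hj0, by simpa using hone⟩
  have hcols0 : ((pvCols grid C i0).head?).isSome :=
    List.isSome_head?.mpr (List.ne_nil_of_mem hj0mem)
  have hi0mem : i0 ∈ pvRows grid R C :=
    List.mem_filter.mpr ⟨List.mem_range.mpr hi0, hcols0⟩
  have hrs : pvRows grid R C ≠ [] := List.ne_nil_of_mem hi0mem
  have hFNne : (List.range R).filterMap (fun i => (pvCols grid C i).head?) ≠ [] := by
    obtain ⟨hd0, hh⟩ := Option.isSome_iff_exists.mp hcols0
    exact List.ne_nil_of_mem (List.mem_filterMap.mpr ⟨i0, List.mem_range.mpr hi0, hh⟩)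
  have hLNne : (List.range R).filterMap (fun i => (pvCols grid C i).getLast?) ≠ [] := by
    obtain ⟨hd0, hh⟩ := Option.isSome_iff_exists.mp
      (List.getLast?_isSome.mpr (List.ne_nil_of_mem hj0mem))
    exact List.ne_nil_of_mem (List.mem_filterMap.mpr ⟨i0, List.mem_range.mpr hi0, hh⟩)
  -- decompose the three nonempty lists
  obtain ⟨rhd, rtl, hrseq⟩ := List.exists_cons_of_ne_nil hrs
  obtain ⟨rys, rlast, hrconc⟩ := (pvRows grid R C).eq_nil_or_concat.resolve_left hrs
  rw [List.concat_eq_append] at hrconc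
  obtain ⟨fhd, ftl, hfeq⟩ := List.exists_cons_of_ne_nil hFNne
  obtain ⟨lhd, ltl, hleq⟩ := List.exists_cons_of_ne_nil hLNne
  -- bounds
  have hrhdR : rhd < R := pv_rows_lt grid R C rhd (hrseq ▸ List.mem_cons_self ..)
  have hrtl : ∀ y ∈ rtl, rhd < y := by
    have := pv_rows_sorted grid R C
    rw [hrseq] at this
    exact fun y hy => List.rel_of_pairwise_cons this hy
  have hrys : ∀ y ∈ rys, y < rlast := by
    have := pv_rows_sorted grid R C
    rw [hrconc] at this
    exact fun y hy => (List.pairwise_append.mp this).2.2 y hy rlast (by simp)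
  have hfhdC : fhd < C := by
    have : fhd ∈ (List.range R).filterMap (fun i => (pvCols grid C i).head?) :=
      hfeq ▸ List.mem_cons_self ..
    obtain ⟨i, _, hh⟩ := List.mem_filterMap.mp this
    exact pv_cols_lt grid C i fhd (List.mem_of_mem_head? hh)
  -- ===== the B side =====
  have hB : getMinArea_alt grid
      = ((rlast : Int) - (rhd : Int) + 1)
        * ((ltl.map (fun (n : Nat) => (n : Int))).foldl max (lhd : Int)
           - (ftl.map (fun (n : Nat) => (n : Int))).foldl min (fhd : Int) + 1) := by
    have S1 : (pvRows grid R C).head? = some rhd := by rw [hrseq]; rfl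
    have S2 : (pvRows grid R C).getLast? = some rlast := by
      rw [hrconc, List.getLast?_concat]
    simp only [getMinArea_alt, ← hR, ← hC, pv_firstOne_eq, pv_lastOne_eq]
    rw [pv_topOpt_eq, pv_botOpt_eq, S1, S2, hfeq, hleq]
    simp only [List.map_cons, PySem.List.min?_id_cons, PySem.List.max?_id_cons]
  -- ===== the A side =====
  -- the inner if-guarded column loop is the fold over row i's 1-column block
  have hinner : ∀ i, (fun (s : Int × Int × Int × Int) => (List.range C).foldl (fun s j =>
        if (grid.getD i []).getD j 0 ≠ 0 then
          (min s.1 (i : Int), max s.2.1 (i : Int), min s.2.2.1 (j : Int), max s.2.2.2 (j : Int))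
        else s) s)
      = (fun s => ((pvCols grid C i).map (fun (j : Nat) => ((i : Int), (j : Int)))).foldl
          (fun s p => (min s.1 p.1, max s.2.1 p.1, min s.2.2.1 p.2, max s.2.2.2 p.2)) s) := by
    intro i; funext s
    exact pv_foldl_if_filter (fun j => (grid.getD i []).getD j 0 ≠ 0)
      (fun (j : Nat) => ((i : Int), (j : Int)))
      (fun s p => (min s.1 p.1, max s.2.1 p.1, min s.2.2.1 p.2, max s.2.2.2 p.2)) _ s
  -- the whole nested loop is the fold over the flattened 1-cell list
  set ones : List (Int × Int) := (List.range R).flatMap (fun i =>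
      (pvCols grid C i).map (fun (j : Nat) => ((i : Int), (j : Int)))) with honesdef
  have hA : (List.range R).foldl (fun s i =>
        (List.range C).foldl (fun s j =>
          if (grid.getD i []).getD j 0 ≠ 0 then
            (min s.1 (i : Int), max s.2.1 (i : Int), min s.2.2.1 (j : Int), max s.2.2.2 (j : Int))
          else s) s) (((R : Int)), 0, ((C : Int)), 0)
      = ones.foldl (fun s p => (min s.1 p.1, max s.2.1 p.1, min s.2.2.1 p.2, max s.2.2.2 p.2))
          (((R : Int)), 0, ((C : Int)), 0) := by
    rw [PySem.List.foldl_congr_mem _ _ _ _ (fun s i _ => congrFun (hinner i) s), honesdef]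
    exact pv_foldl_foldl_flatMap _ _ _ _
  -- projections of the 1-cell list
  have hfst : ones.map Prod.fst
      = (List.range R).flatMap (fun i => (pvCols grid C i).map (fun _ => (i : Int))) := by
    simp [honesdef, List.map_flatMap, List.map_map, Function.comp_def]
  have hsnd : ones.map Prod.snd
      = (List.range R).flatMap (fun i => (pvCols grid C i).map (fun (j : Nat) => (j : Int))) := by
    simp [honesdef, List.map_flatMap, List.map_map, Function.comp_def]
  -- the four components
  have ctop : (ones.map Prod.fst).foldl min (R : Int) = (rhd : Int) := by
    rw [hfst, ← pv_foldl_foldl_flatMap]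
    have hb : ∀ (a : Int) (i : Nat), ((pvCols grid C i).map (fun _ => (i : Int))).foldl min a
        = if ((pvCols grid C i).head?).isSome then min a (i : Int) else a := by
      intro a i
      rw [pv_block_const_min]
      cases h : (pvCols grid C i).head? <;> rfl
    simp only [hb]
    rw [pv_foldl_if_filter_bool]
    show ((pvRows grid R C).map (fun (i : Nat) => (i : Int))).foldl min (R : Int) = (rhd : Int)
    rw [hrseq, List.map_cons, pv_foldl_min_cons _ _ _ (fun y hy => by
      obtain ⟨z, hz, rfl⟩ := List.mem_map.mp hy
      exact_mod_cast (hrtl z hz).le)]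
    rw [min_eq_right (by exact_mod_cast hrhdR.le)]
  have cbot : (ones.map Prod.fst).foldl max 0 = (rlast : Int) := by
    rw [hfst, ← pv_foldl_foldl_flatMap]
    have hb : ∀ (a : Int) (i : Nat), ((pvCols grid C i).map (fun _ => (i : Int))).foldl max a
        = if ((pvCols grid C i).head?).isSome then max a (i : Int) else a := by
      intro a i
      rw [pv_block_const_max]
      have hiff : ((pvCols grid C i).head?).isSome = ((pvCols grid C i).getLast?).isSome := by
        rw [Bool.eq_iff_iff, List.getLast?_isSome, List.isSome_head?]
      rw [hiff]
      cases h : (pvCols grid C i).getLast? <;> rfl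
    simp only [hb]
    rw [pv_foldl_if_filter_bool]
    show ((pvRows grid R C).map (fun (i : Nat) => (i : Int))).foldl max 0 = (rlast : Int)
    rw [hrconc, List.map_append, List.map_cons, List.map_nil,
      pv_foldl_max_concat _ _ _ (fun y hy => by
        obtain ⟨z, hz, rfl⟩ := List.mem_map.mp hy
        exact_mod_cast (hrys z hz).le)]
    rw [max_eq_right (by positivity)]
  have cleft : (ones.map Prod.snd).foldl min (C : Int)
      = (ftl.map (fun (n : Nat) => (n : Int))).foldl min (fhd : Int) := by
    rw [hsnd, ← pv_foldl_foldl_flatMap]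
    have hb : ∀ (a : Int) (i : Nat), ((pvCols grid C i).map (fun (j : Nat) => (j : Int))).foldl min a
        = ((pvCols grid C i).head?).elim a (fun f => min a (f : Int)) := fun a i =>
      pv_block_min _ (pv_cols_sorted grid C i) a
    simp only [hb]
    rw [pv_foldl_filterMap, ← List.foldl_map]
    rw [hfeq, List.map_cons, List.foldl_cons, min_eq_right (by exact_mod_cast hfhdC.le)]
  have cright : (ones.map Prod.snd).foldl max 0
      = (ltl.map (fun (n : Nat) => (n : Int))).foldl max (lhd : Int) := by
    rw [hsnd, ← pv_foldl_foldl_flatMap]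
    have hb : ∀ (a : Int) (i : Nat), ((pvCols grid C i).map (fun (j : Nat) => (j : Int))).foldl max a
        = ((pvCols grid C i).getLast?).elim a (fun g => max a (g : Int)) := fun a i =>
      pv_block_max _ (pv_cols_sorted grid C i) a
    simp only [hb]
    rw [pv_foldl_filterMap, ← List.foldl_map]
    rw [hleq, List.map_cons, List.foldl_cons, max_eq_right (by positivity)]
  -- assemble
  rw [hB]
  show (let s := (List.range R).foldl _ (((R : Int)), 0, ((C : Int)), 0)
    (s.2.1 - s.1 + 1) * (s.2.2.2 - s.2.2.1 + 1)) = _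
  rw [hA, pv_fold_split, ctop, cbot, cleft, cright]

-- ===== VERDICT (by name: the statement is the Claim_ definition above) =====
theorem getMinArea_spec : Claim_equal_getMinArea := by
  intro grid _ hpre
  exact pv_main grid hpre
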